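-- pv_equiv track=rewrite | github.com/chandan766/Encoder-Decoder-Python | encode_decode.py | check_ascii
-- ===== SOURCE A (Python) =====
-- def check_ascii(a):
--     for i in range(65,123):
--         if i>90 and i<103:
--             pass
--         else:
--             if a == i:
--                 flag = 1
--                 break
--             else:
--                 flag = 0
--     if flag == 1:
--         return True
--     else:
--         return False
-- ===== SOURCE B (Python) =====
-- def check_ascii(a):
--     return a in range(65, 91) or a in range(103, 123)
-- ===== Notes on version B (the rewrite author's own statement) =====
-- stated objective: simpler
-- what changed: Replaced the flag-and-break scan over range(65,123) with a direct two-range membership expression (65-90 or 103-122).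
import Mathlib
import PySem

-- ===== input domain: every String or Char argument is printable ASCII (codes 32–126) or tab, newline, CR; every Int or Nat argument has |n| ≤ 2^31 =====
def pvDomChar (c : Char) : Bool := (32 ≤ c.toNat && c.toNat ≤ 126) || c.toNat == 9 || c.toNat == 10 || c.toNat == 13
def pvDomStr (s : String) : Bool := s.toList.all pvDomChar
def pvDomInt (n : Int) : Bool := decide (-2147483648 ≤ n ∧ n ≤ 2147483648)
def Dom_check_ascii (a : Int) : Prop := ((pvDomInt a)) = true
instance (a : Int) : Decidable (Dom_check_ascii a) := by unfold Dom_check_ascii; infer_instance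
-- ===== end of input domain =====

-- B replaces A's flag-and-break scan over range(65,123) by a direct two-range membership test (simpler).

-- ===== PORT A =====
-- The loop over range(65,123) carrying Python's `flag`; the first iteration (i=65) always
-- assigns `flag`, so the initial value 0 passed here is never observed by the final test.
def checkAsciiLoop (a : Int) : List Int → Int → Int
  | [], flag => flag
  | i :: rest, flag =>
    if 90 < i ∧ i < 103 then checkAsciiLoop a rest flag   -- pass
    else if a == i then 1                                 -- flag = 1; break
    else checkAsciiLoop a rest 0                          -- flag = 0

def check_ascii (a : Int) : Bool :=
  let flag := checkAsciiLoop a (PySem.List.pyRange 65 123 1) 0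
  if flag == 1 then true else false

-- ===== PORT B =====
-- a in range(65,91) or a in range(103,123)
def check_ascii_alt (a : Int) : Bool :=
  (65 ≤ a && a ≤ 90) || (103 ≤ a && a ≤ 122)

-- ===== PRECONDITION & SPEC =====
def Spec_check_ascii (a : Int) (out : Bool) : Prop := out = check_ascii_alt a
instance (a : Int) (out : Bool) : Decidable (Spec_check_ascii a out) := by unfold Spec_check_ascii; infer_instance

-- ===== CLAIM (what is proved, stated in full; the proofs are below) =====
def Claim_equal_check_ascii : Prop := ∀ (a : Int), Dom_check_ascii a → Spec_check_ascii a (check_ascii a)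

-- ===== LEMMAS AND PROOFS =====

-- Characterisation of A's loop: it ends with flag = 1 iff some non-skipped element matches a,
-- or the initial flag survives because every element is skipped.
theorem checkAsciiLoop_spec (a : Int) (l : List Int) (flag : Int) :
    checkAsciiLoop a l flag =
      (if (∃ i ∈ l, ¬(90 < i ∧ i < 103) ∧ a = i) then 1
       else if ∀ i ∈ l, 90 < i ∧ i < 103 then flag else 0) := by
  induction l generalizing flag with
  | nil => simp [checkAsciiLoop]
  | cons i rest ih =>
    simp only [checkAsciiLoop]
    by_cases hs : 90 < i ∧ i < 103
    · rw [if_pos hs, ih]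
      have he : (∃ j ∈ i :: rest, ¬(90 < j ∧ j < 103) ∧ a = j) ↔
          ∃ j ∈ rest, ¬(90 < j ∧ j < 103) ∧ a = j := by
        constructor
        · rintro ⟨j, hj, h1, h2⟩
          rcases List.mem_cons.mp hj with rfl | hj'
          · exact absurd hs h1
          · exact ⟨j, hj', h1, h2⟩
        · rintro ⟨j, hj, h⟩
          exact ⟨j, List.mem_cons_of_mem _ hj, h⟩
      have ha : (∀ j ∈ i :: rest, 90 < j ∧ j < 103) ↔
          ∀ j ∈ rest, 90 < j ∧ j < 103 := by
        rw [List.forall_mem_cons]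
        exact ⟨fun h => h.2, fun h => ⟨hs, h⟩⟩
      rw [if_congr he rfl (if_congr ha rfl rfl)]
    · rw [if_neg hs]
      by_cases hm : a = i
      · rw [if_pos (by simp [hm])]
        have hx : ∃ j ∈ i :: rest, ¬(90 < j ∧ j < 103) ∧ a = j :=
          ⟨i, List.mem_cons_self, hs, hm⟩
        rw [if_pos hx]
      · rw [if_neg (by simp [hm]), ih]
        have he : (∃ j ∈ i :: rest, ¬(90 < j ∧ j < 103) ∧ a = j) ↔
            ∃ j ∈ rest, ¬(90 < j ∧ j < 103) ∧ a = j := by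
          constructor
          · rintro ⟨j, hj, h1, h2⟩
            rcases List.mem_cons.mp hj with rfl | hj'
            · exact absurd h2 hm
            · exact ⟨j, hj', h1, h2⟩
          · rintro ⟨j, hj, h⟩
            exact ⟨j, List.mem_cons_of_mem _ hj, h⟩
        have ha2 : ¬ ∀ j ∈ i :: rest, 90 < j ∧ j < 103 :=
          fun h => hs (h i List.mem_cons_self)
        by_cases hE : ∃ j ∈ rest, ¬(90 < j ∧ j < 103) ∧ a = j
        · rw [if_pos hE, if_pos (he.mpr hE)]
        · rw [if_neg hE, if_neg (fun h => hE (he.mp h)), if_neg ha2]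
          split <;> rfl

theorem check_ascii_eq (a : Int) : check_ascii a = check_ascii_alt a := by
  unfold check_ascii check_ascii_alt
  rw [checkAsciiLoop_spec]
  by_cases h : ∃ i ∈ PySem.List.pyRange 65 123 1, ¬(90 < i ∧ i < 103) ∧ a = i
  · rw [if_pos h]
    obtain ⟨i, hi, hns, rfl⟩ := h
    rw [PySem.List.mem_pyRange_one] at hi
    have halt : ((65 ≤ a && a ≤ 90) || (103 ≤ a && a ≤ 122)) = true := by
      simp only [Bool.or_eq_true, Bool.and_eq_true, decide_eq_true_eq]
      omega
    simp [halt]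
  · have hnotall : ¬ ∀ i ∈ PySem.List.pyRange 65 123 1, 90 < i ∧ i < 103 := by
      intro hall
      have h65 : (65 : Int) ∈ PySem.List.pyRange 65 123 1 := by
        rw [PySem.List.mem_pyRange_one]; omega
      have := hall 65 h65; omega
    have halt : ((65 ≤ a && a ≤ 90) || (103 ≤ a && a ≤ 122)) = false := by
      by_contra hc
      rw [Bool.not_eq_false, Bool.or_eq_true, Bool.and_eq_true, Bool.and_eq_true] at hc
      simp only [decide_eq_true_eq] at hc
      exact h ⟨a, by rw [PySem.List.mem_pyRange_one]; omega, by omega, rfl⟩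
    rw [if_neg h, if_neg hnotall]
    simp [halt]

-- ===== VERDICT (by name: the statement is the Claim_ definition above) =====
theorem check_ascii_spec : Claim_equal_check_ascii := by
  intro a _
  unfold Spec_check_ascii
  exact check_ascii_eq a
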